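-- pv_equiv track=rewrite | github.com/tethysplatform/tethys | scripts/convert_unittest_to_pytest.py | _smart_split_args
-- ===== SOURCE A (Python) =====
-- from typing import List, Tuple, Optional, Dict
--
-- def _smart_split_args(args_str: str) -> List[str]:
--     """Split function arguments by comma, respecting nested parentheses and brackets."""
--     args = []
--     current_arg = []
--     depth = 0
--
--     for char in args_str:
--         if char in "([{":
--             depth += 1
--             current_arg.append(char)
--         elif char in ")]}":
--             depth -= 1
--             current_arg.append(char)
--         elif char == "," and depth == 0:
--             args.append("".join(current_arg))
--             current_arg = []
--         else:
--             current_arg.append(char)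
--
--     # Add the last argument
--     if current_arg:
--         args.append("".join(current_arg))
--
--     return args
-- ===== SOURCE B (Python) =====
-- def _smart_split_args(args_str):
--     """Split function arguments by comma, respecting nested parentheses and brackets.
--
--     Boundary-finding then slicing: one pass records the indices of depth-0 commas
--     (no character accumulation), then the result is built by slicing args_str
--     between consecutive boundaries; the final slice is dropped only if empty.
--     """
--     n = len(args_str)
--     depth = 0
--     cuts = []
--     for i, ch in enumerate(args_str):
--         if ch in "([{":
--             depth += 1
--         elif ch in ")]}":
--             depth -= 1
--         elif ch == "," and depth == 0:
--             cuts.append(i)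
--     starts = [0] + [i + 1 for i in cuts]
--     ends = cuts + [n]
--     parts = [args_str[s:e] for s, e in zip(starts, ends)]
--     if parts[-1] == "":
--         parts.pop()
--     return parts
-- ===== Notes on version B (the rewrite author's own statement) =====
-- stated objective: alternative
-- what changed: Instead of accumulating characters into a growing current-argument buffer, B does one pass recording only the indices of depth-0 commas and then builds the result by slicing the input between consecutive boundaries, dropping the final slice only when empty.
import Mathlib
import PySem

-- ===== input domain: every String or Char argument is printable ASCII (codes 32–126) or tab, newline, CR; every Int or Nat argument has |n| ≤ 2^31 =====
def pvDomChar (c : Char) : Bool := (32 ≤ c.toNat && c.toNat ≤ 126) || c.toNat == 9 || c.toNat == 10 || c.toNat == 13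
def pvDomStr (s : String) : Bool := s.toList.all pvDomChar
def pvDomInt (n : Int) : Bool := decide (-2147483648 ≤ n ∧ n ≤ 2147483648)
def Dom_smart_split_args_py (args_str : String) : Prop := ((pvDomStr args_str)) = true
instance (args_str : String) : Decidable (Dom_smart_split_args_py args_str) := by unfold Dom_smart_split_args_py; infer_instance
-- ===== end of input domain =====

-- B replaces A's character-accumulating current-argument buffer by one pass that records
-- the indices of depth-0 commas and then slices the input between consecutive boundaries
-- (objective: alternative decomposition, same cost).

-- ===== PORT A =====
-- one step of A's loop body (state: args so far, current_arg buffer, depth)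
def pvStepA (st : List String × List Char × Int) (c : Char) : List String × List Char × Int :=
  if c = '(' ∨ c = '[' ∨ c = '{' then (st.1, st.2.1 ++ [c], st.2.2 + 1)
  else if c = ')' ∨ c = ']' ∨ c = '}' then (st.1, st.2.1 ++ [c], st.2.2 - 1)
  else if c = ',' ∧ st.2.2 = 0 then (st.1 ++ [String.ofList st.2.1], [], st.2.2)
  else (st.1, st.2.1 ++ [c], st.2.2)

def smart_split_args_py (args_str : String) : List String :=
  let st := args_str.toList.foldl pvStepA ([], [], 0)
  -- "if current_arg: args.append(''.join(current_arg))"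
  if st.2.1 = [] then st.1 else st.1 ++ [String.ofList st.2.1]

-- ===== PORT B =====
-- one step of B's scan (state: cut indices so far, depth, running index of Python's enumerate)
def pvStepB (st : List Nat × Int × Nat) (c : Char) : List Nat × Int × Nat :=
  if c = '(' ∨ c = '[' ∨ c = '{' then (st.1, st.2.1 + 1, st.2.2 + 1)
  else if c = ')' ∨ c = ']' ∨ c = '}' then (st.1, st.2.1 - 1, st.2.2 + 1)
  else if c = ',' ∧ st.2.1 = 0 then (st.1 ++ [st.2.2], st.2.1, st.2.2 + 1)
  else (st.1, st.2.1, st.2.2 + 1)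

def smart_split_args_py_alt (args_str : String) : List String :=
  let cs := args_str.toList
  let n := cs.length
  let cuts := (cs.foldl pvStepB ([], 0, 0)).1
  let starts := 0 :: cuts.map (· + 1)
  let ends := cuts ++ [n]
  -- args_str[s:e] with 0 ≤ s ≤ e ≤ n is exactly drop s / take (e - s) on the char list
  let parts := (starts.zip ends).map (fun se => String.ofList ((cs.drop se.1).take (se.2 - se.1)))
  -- "if parts[-1] == '': parts.pop()"  (parts is never empty: len(starts) = len(cuts) + 1)
  if parts.getLast? = some "" then parts.dropLast else parts

-- ===== PRECONDITION & SPEC =====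
def Spec_smart_split_args_py (args_str : String) (out : List String) : Prop := out = smart_split_args_py_alt args_str
instance (args_str : String) (out : List String) : Decidable (Spec_smart_split_args_py args_str out) := by unfold Spec_smart_split_args_py; infer_instance

-- ===== CLAIM (what is proved, stated in full; the proofs are below) =====
def Claim_equal_smart_split_args_py : Prop := ∀ (args_str : String), Dom_smart_split_args_py args_str → Spec_smart_split_args_py args_str (smart_split_args_py args_str)

-- ===== LEMMAS AND PROOFS =====

def pvConsH (cur : List Char) : List (List Char) → List (List Char)
  | [] => [cur]
  | h :: t => (cur ++ h) :: t
def pvSplitD : List Char → Int → List (List Char)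
  | [], _ => [[]]
  | c :: cs, d =>
    if c = '(' ∨ c = '[' ∨ c = '{' then pvConsH [c] (pvSplitD cs (d + 1))
    else if c = ')' ∨ c = ']' ∨ c = '}' then pvConsH [c] (pvSplitD cs (d - 1))
    else if c = ',' ∧ d = 0 then [] :: pvSplitD cs d
    else pvConsH [c] (pvSplitD cs d)
def pvCutsRel : List Char → Int → List Nat
  | [], _ => []
  | c :: cs, d =>
    if c = '(' ∨ c = '[' ∨ c = '{' then (pvCutsRel cs (d + 1)).map (· + 1)
    else if c = ')' ∨ c = ']' ∨ c = '}' then (pvCutsRel cs (d - 1)).map (· + 1)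
    else if c = ',' ∧ d = 0 then 0 :: (pvCutsRel cs d).map (· + 1)
    else (pvCutsRel cs d).map (· + 1)
def pvSegsOut (ss : List (List Char)) : List String :=
  if ss.getLast? = some [] then ss.dropLast.map String.ofList else ss.map String.ofList
def pvPartsFor (cs : List Char) (cuts : List Nat) : List (List Char) :=
  ((0 :: cuts.map (· + 1)).zip (cuts ++ [cs.length])).map
    (fun se => (cs.drop se.1).take (se.2 - se.1))
def pvFinA (st : List String × List Char × Int) : List String :=
  if st.2.1 = [] then st.1 else st.1 ++ [String.ofList st.2.1]

theorem pvConsH_ne_nil (cur : List Char) (ss : List (List Char)) : pvConsH cur ss ≠ [] := by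
  cases ss <;> simp [pvConsH]
theorem pvSplitD_ne_nil (cs : List Char) (d : Int) : pvSplitD cs d ≠ [] := by
  cases cs with
  | nil => simp [pvSplitD]
  | cons c cs => unfold pvSplitD; split_ifs <;> first | exact pvConsH_ne_nil _ _ | simp
theorem pvConsH_consH (cur c : List Char) (ss : List (List Char)) :
    pvConsH cur (pvConsH c ss) = pvConsH (cur ++ c) ss := by
  cases ss <;> simp [pvConsH]
theorem pvConsH_nil (ss : List (List Char)) (h : ss ≠ []) : pvConsH [] ss = ss := by
  obtain ⟨a, t, rfl⟩ := List.exists_cons_of_ne_nil h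
  simp [pvConsH]
theorem pvSegsOut_cons (cur : List Char) (ss : List (List Char)) (h : ss ≠ []) :
    pvSegsOut (cur :: ss) = String.ofList cur :: pvSegsOut ss := by
  obtain ⟨a, t, rfl⟩ := List.exists_cons_of_ne_nil h
  unfold pvSegsOut
  split_ifs with h1 h2 <;> simp_all

theorem pvMapShift (l : List Nat) (k : Nat) :
    (l.map (· + 1)).map (· + k) = l.map (· + (k + 1)) := by
  rw [List.map_map]; apply List.map_congr_left; intro x _; simp; omega

theorem pvA_char (cs : List Char) : ∀ (args : List String) (cur : List Char) (d : Int),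
    pvFinA (cs.foldl pvStepA (args, cur, d)) = args ++ pvSegsOut (pvConsH cur (pvSplitD cs d)) := by
  induction cs with
  | nil =>
    intro args cur d
    cases cur <;> simp [pvFinA, pvSplitD, pvConsH, pvSegsOut]
  | cons c cs ih =>
    intro args cur d
    rw [List.foldl_cons]
    by_cases h1 : c = '(' ∨ c = '[' ∨ c = '{'
    · rw [show pvStepA (args, cur, d) c = (args, cur ++ [c], d + 1) by simp [pvStepA, h1],
        ih, show pvSplitD (c :: cs) d = pvConsH [c] (pvSplitD cs (d + 1)) by rw [pvSplitD]; simp [h1],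
        pvConsH_consH]
    · by_cases h2 : c = ')' ∨ c = ']' ∨ c = '}'
      · rw [show pvStepA (args, cur, d) c = (args, cur ++ [c], d - 1) by simp [pvStepA, h1, h2],
          ih, show pvSplitD (c :: cs) d = pvConsH [c] (pvSplitD cs (d - 1)) by rw [pvSplitD]; simp [h1, h2],
          pvConsH_consH]
      · by_cases h3 : c = ',' ∧ d = 0
        · rw [show pvStepA (args, cur, d) c = (args ++ [String.ofList cur], [], d) by
              simp [pvStepA, h1, h2, h3],
            ih, pvConsH_nil _ (pvSplitD_ne_nil _ _),
            show pvSplitD (c :: cs) d = [] :: pvSplitD cs d by rw [pvSplitD]; simp [h1, h2, h3]]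
          rw [show pvConsH cur ([] :: pvSplitD cs d) = cur :: pvSplitD cs d by simp [pvConsH],
            pvSegsOut_cons _ _ (pvSplitD_ne_nil _ _)]
          simp
        · rw [show pvStepA (args, cur, d) c = (args, cur ++ [c], d) by simp [pvStepA, h1, h2, h3],
            ih, show pvSplitD (c :: cs) d = pvConsH [c] (pvSplitD cs d) by rw [pvSplitD]; simp [h1, h2, h3],
            pvConsH_consH]

theorem pvB_cuts (cs : List Char) : ∀ (acc : List Nat) (d : Int) (k : Nat),
    (cs.foldl pvStepB (acc, d, k)).1 = acc ++ (pvCutsRel cs d).map (· + k) := by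
  induction cs with
  | nil => intro acc d k; simp [pvCutsRel]
  | cons c cs ih =>
    intro acc d k
    rw [List.foldl_cons]
    by_cases h1 : c = '(' ∨ c = '[' ∨ c = '{'
    · rw [show pvStepB (acc, d, k) c = (acc, d + 1, k + 1) by simp [pvStepB, h1], ih,
        show pvCutsRel (c :: cs) d = (pvCutsRel cs (d + 1)).map (· + 1) by rw [pvCutsRel]; simp [h1],
        pvMapShift]
    · by_cases h2 : c = ')' ∨ c = ']' ∨ c = '}'
      · rw [show pvStepB (acc, d, k) c = (acc, d - 1, k + 1) by simp [pvStepB, h1, h2], ih,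
          show pvCutsRel (c :: cs) d = (pvCutsRel cs (d - 1)).map (· + 1) by rw [pvCutsRel]; simp [h1, h2],
          pvMapShift]
      · by_cases h3 : c = ',' ∧ d = 0
        · rw [show pvStepB (acc, d, k) c = (acc ++ [k], d, k + 1) by simp [pvStepB, h1, h2, h3], ih,
            show pvCutsRel (c :: cs) d = 0 :: (pvCutsRel cs d).map (· + 1) by rw [pvCutsRel]; simp [h1, h2, h3]]
          simp [pvMapShift]
          intros; omega
        · rw [show pvStepB (acc, d, k) c = (acc, d, k + 1) by simp [pvStepB, h1, h2, h3], ih,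
            show pvCutsRel (c :: cs) d = (pvCutsRel cs d).map (· + 1) by rw [pvCutsRel]; simp [h1, h2, h3],
            pvMapShift]

theorem pvSliceShift (c : Char) (cs : List Char) (xs ys : List Nat) :
    ((xs.map (· + 1)).zip (ys.map (· + 1))).map
        (fun se => ((c :: cs).drop se.1).take (se.2 - se.1)) =
      (xs.zip ys).map (fun se => (cs.drop se.1).take (se.2 - se.1)) := by
  rw [List.zip_map, List.map_map]
  apply List.map_congr_left
  intro p _
  simp [Prod.map, List.drop_succ_cons, Nat.succ_sub_succ]

theorem pvParts_shift (c : Char) (cs : List Char) (cuts : List Nat) :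
    pvPartsFor (c :: cs) (cuts.map (· + 1)) = pvConsH [c] (pvPartsFor cs cuts) := by
  cases cuts with
  | nil =>
    simp [pvPartsFor, pvConsH, List.take_of_length_le]
  | cons i rest =>
    unfold pvPartsFor
    simp only [List.length_cons, List.map_cons, List.cons_append, List.zip_cons_cons,
      List.map_cons, pvConsH]
    congr 1
    have h := pvSliceShift c cs ((i + 1) :: rest.map (· + 1)) (rest ++ [cs.length])
    simp only [List.map_cons, List.map_map, List.map_append] at h
    convert h using 3 <;> simp [List.map_map]

theorem pvParts_shift0 (c : Char) (cs : List Char) (cuts : List Nat) :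
    pvPartsFor (c :: cs) (0 :: cuts.map (· + 1)) = [] :: pvPartsFor cs cuts := by
  unfold pvPartsFor
  simp only [List.length_cons, List.map_cons, List.cons_append, List.zip_cons_cons, List.map_cons]
  congr 1
  have h := pvSliceShift c cs (0 :: cuts.map (· + 1)) (cuts ++ [cs.length])
  simp only [List.map_cons, List.map_map, List.map_append] at h
  convert h using 3 <;> simp [List.map_map]

theorem pvParts_eq_splitD (cs : List Char) : ∀ (d : Int),
    pvPartsFor cs (pvCutsRel cs d) = pvSplitD cs d := by
  induction cs with
  | nil => intro d; simp [pvPartsFor, pvCutsRel, pvSplitD]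
  | cons c cs ih =>
    intro d
    by_cases h1 : c = '(' ∨ c = '[' ∨ c = '{'
    · rw [show pvCutsRel (c :: cs) d = (pvCutsRel cs (d + 1)).map (· + 1) by rw [pvCutsRel]; simp [h1],
        pvParts_shift, ih, show pvSplitD (c :: cs) d = pvConsH [c] (pvSplitD cs (d + 1)) by rw [pvSplitD]; simp [h1]]
    · by_cases h2 : c = ')' ∨ c = ']' ∨ c = '}'
      · rw [show pvCutsRel (c :: cs) d = (pvCutsRel cs (d - 1)).map (· + 1) by rw [pvCutsRel]; simp [h1, h2],
          pvParts_shift, ih, show pvSplitD (c :: cs) d = pvConsH [c] (pvSplitD cs (d - 1)) by rw [pvSplitD]; simp [h1, h2]]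
      · by_cases h3 : c = ',' ∧ d = 0
        · rw [show pvCutsRel (c :: cs) d = 0 :: (pvCutsRel cs d).map (· + 1) by rw [pvCutsRel]; simp [h1, h2, h3],
            pvParts_shift0, ih, show pvSplitD (c :: cs) d = [] :: pvSplitD cs d by rw [pvSplitD]; simp [h1, h2, h3]]
        · rw [show pvCutsRel (c :: cs) d = (pvCutsRel cs d).map (· + 1) by rw [pvCutsRel]; simp [h1, h2, h3],
            pvParts_shift, ih, show pvSplitD (c :: cs) d = pvConsH [c] (pvSplitD cs d) by rw [pvSplitD]; simp [h1, h2, h3]]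

theorem pvSegsOut_eq (ss : List (List Char)) :
    (if (ss.map String.ofList).getLast? = some "" then (ss.map String.ofList).dropLast
     else ss.map String.ofList) = pvSegsOut ss := by
  unfold pvSegsOut
  rw [List.getLast?_map]
  cases h : ss.getLast? with
  | none => simp
  | some l =>
    simp only [Option.map_some, Option.some.injEq, String.ofList_eq_empty_iff]
    split_ifs with h1
    · exact List.map_dropLast.symm
    · rfl

theorem pvPartsMap (cs : List Char) (cuts : List Nat) :
    ((0 :: cuts.map (· + 1)).zip (cuts ++ [cs.length])).map
        (fun se => String.ofList ((cs.drop se.1).take (se.2 - se.1))) =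
      (pvPartsFor cs cuts).map String.ofList := by
  rw [pvPartsFor, List.map_map]
  rfl

-- ===== VERDICT (by name: the statement is the Claim_ definition above) =====
theorem smart_split_args_py_spec : Claim_equal_smart_split_args_py := by
  intro s _
  show smart_split_args_py s = smart_split_args_py_alt s
  have hA : smart_split_args_py s = pvSegsOut (pvSplitD s.toList 0) := by
    have h := pvA_char s.toList [] [] 0
    rw [pvConsH_nil _ (pvSplitD_ne_nil _ _)] at h
    simpa [pvFinA] using h
  have hcuts : (s.toList.foldl pvStepB ([], 0, 0)).1 = pvCutsRel s.toList 0 := by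
    simpa using pvB_cuts s.toList [] 0 0
  have hB : smart_split_args_py_alt s = pvSegsOut (pvSplitD s.toList 0) := by
    show (if _ = some "" then _ else _) = _
    rw [hcuts, pvPartsMap, pvParts_eq_splitD, pvSegsOut_eq]
  rw [hA, hB]
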